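-- pv_equiv track=rewrite | github.com/tpsavard/Tools | Python/training_calendar_generator.py | get_week_schedule
-- ===== SOURCE A (Python) =====
-- def get_week_schedule(schedule):
--     schedule_length = 0
--     running_today = []
--     events = []
--     for event in schedule:
--         if event.casefold() == "rest".casefold():  # YAML Plan Keyword
--             running_today.append(False)
--         else:
--             schedule_length += 1
--             running_today.append(True)
--             events.append(event)
--
--     return schedule_length, running_today, events
-- ===== SOURCE B (Python) =====
-- def get_week_schedule(schedule):
--     # Divide and conquer: split the week in half, solve each half recursively,
--     # and combine by concatenating the partial results and adding the counts.
--     if not schedule: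
--         return 0, [], []
--     if len(schedule) == 1:
--         event = schedule[0]
--         if event.casefold() == "rest".casefold():
--             return 0, [False], []
--         return 1, [True], [event]
--     mid = len(schedule) // 2
--     n1, f1, e1 = get_week_schedule(schedule[:mid])
--     n2, f2, e2 = get_week_schedule(schedule[mid:])
--     return n1 + n2, f1 + f2, e1 + e2
-- ===== Notes on version B (the rewrite author's own statement) =====
-- stated objective: alternative
-- what changed: Replaced A's single accumulating left-to-right loop with a divide-and-conquer recursion: split the schedule in half, recursively compute each half's triple, and combine by adding counts and concatenating the lists.
import Mathlib
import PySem

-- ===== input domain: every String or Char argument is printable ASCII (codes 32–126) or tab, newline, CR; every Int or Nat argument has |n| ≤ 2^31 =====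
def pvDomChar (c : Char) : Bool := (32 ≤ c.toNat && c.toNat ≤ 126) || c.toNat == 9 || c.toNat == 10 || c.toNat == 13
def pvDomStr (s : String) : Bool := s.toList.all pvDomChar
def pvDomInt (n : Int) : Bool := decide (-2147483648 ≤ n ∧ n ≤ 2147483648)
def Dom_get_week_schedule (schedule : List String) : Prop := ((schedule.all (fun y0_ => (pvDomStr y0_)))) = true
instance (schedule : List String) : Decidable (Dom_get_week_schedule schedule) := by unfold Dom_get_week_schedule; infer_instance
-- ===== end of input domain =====

-- B replaces A's single accumulating left-to-right loop with a divide-and-conquer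
-- recursion (split in half, recurse, combine) — an alternative decomposition, same results.
-- casefold is ported as PySem.Str.lower, exact on the ASCII domain.

-- ===== PORT A =====
-- literal transliteration: one fold carrying (schedule_length, running_today, events)
def get_week_schedule (schedule : List String) : Int × List Bool × List String :=
  schedule.foldl
    (fun st event =>
      let (schedule_length, running_today, events) := st
      if PySem.Str.lower event == PySem.Str.lower "rest" then
        (schedule_length, running_today ++ [false], events)
      else
        (schedule_length + 1, running_today ++ [true], events ++ [event]))
    (0, [], [])

-- ===== PORT B =====
-- literal transliteration of Source B's divide-and-conquer; schedule[:mid]/schedule[mid:]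
-- with 0 ≤ mid ≤ len are exactly List.take/List.drop
def get_week_schedule_alt : List String → Int × List Bool × List String
  | [] => (0, [], [])
  | [event] =>
      if PySem.Str.lower event == PySem.Str.lower "rest" then (0, [false], [])
      else (1, [true], [event])
  | x :: y :: rest =>
      let s := x :: y :: rest
      let mid := s.length / 2
      let (n1, f1, e1) := get_week_schedule_alt (s.take mid)
      let (n2, f2, e2) := get_week_schedule_alt (s.drop mid)
      (n1 + n2, f1 ++ f2, e1 ++ e2)
termination_by s => s.length
decreasing_by
  · simp [List.length_take]; omega
  · simp; omega

-- ===== PRECONDITION & SPEC =====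
def Spec_get_week_schedule (schedule : List String) (out : Int × List Bool × List String) : Prop := out = get_week_schedule_alt schedule
instance (schedule : List String) (out : Int × List Bool × List String) : Decidable (Spec_get_week_schedule schedule out) := by unfold Spec_get_week_schedule; infer_instance

-- ===== CLAIM (what is proved, stated in full; the proofs are below) =====
def Claim_equal_get_week_schedule : Prop := ∀ (schedule : List String), Dom_get_week_schedule schedule → Spec_get_week_schedule schedule (get_week_schedule schedule)

-- ===== LEMMAS AND PROOFS =====

-- common characterisation: count / flags / events expressed by filter and map
def pvTriple (s : List String) : Int × List Bool × List String :=
  (((s.filter (fun e => !(PySem.Str.lower e == "rest"))).length : Int),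
   s.map (fun e => !(PySem.Str.lower e == "rest")),
   s.filter (fun e => !(PySem.Str.lower e == "rest")))

-- A's loop invariant: the fold from an arbitrary accumulator appends pvTriple's results
lemma get_week_schedule_fold (schedule : List String) (n : Int) (rt : List Bool) (ev : List String) :
    schedule.foldl
      (fun st event =>
        let (schedule_length, running_today, events) := st
        if PySem.Str.lower event == PySem.Str.lower "rest" then
          (schedule_length, running_today ++ [false], events)
        else
          (schedule_length + 1, running_today ++ [true], events ++ [event]))
      (n, rt, ev)
    = (n + ((schedule.filter (fun e => !(PySem.Str.lower e == "rest"))).length : Int),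
       rt ++ schedule.map (fun e => !(PySem.Str.lower e == "rest")),
       ev ++ schedule.filter (fun e => !(PySem.Str.lower e == "rest"))) := by
  induction schedule generalizing n rt ev with
  | nil => simp
  | cons x xs ih =>
    rw [List.foldl_cons]
    by_cases h : (PySem.Str.lower x == PySem.Str.lower "rest") = true
    · have hx : (PySem.Str.lower x == "rest") = true := by
        simpa [show PySem.Str.lower "rest" = "rest" by decide] using h
      show List.foldl _ (if (PySem.Str.lower x == PySem.Str.lower "rest") = true
        then (n, rt ++ [false], ev) else (n + 1, rt ++ [true], ev ++ [x])) xs = _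
      rw [if_pos h, ih]
      simp [hx]
    · have hx : (PySem.Str.lower x == "rest") = false := by
        simpa [show PySem.Str.lower "rest" = "rest" by decide] using eq_false_of_ne_true h
      show List.foldl _ (if (PySem.Str.lower x == PySem.Str.lower "rest") = true
        then (n, rt ++ [false], ev) else (n + 1, rt ++ [true], ev ++ [x])) xs = _
      rw [if_neg h, ih]
      simp [hx]
      omega

lemma get_week_schedule_eq_triple (schedule : List String) :
    get_week_schedule schedule = pvTriple schedule := by
  rw [get_week_schedule, get_week_schedule_fold, pvTriple]
  simp

-- pvTriple splits over take/drop concatenation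
lemma pvTriple_append (a b : List String) :
    pvTriple (a ++ b) =
      ((pvTriple a).1 + (pvTriple b).1,
       (pvTriple a).2.1 ++ (pvTriple b).2.1,
       (pvTriple a).2.2 ++ (pvTriple b).2.2) := by
  simp [pvTriple]

lemma get_week_schedule_alt_eq_triple (schedule : List String) :
    get_week_schedule_alt schedule = pvTriple schedule := by
  induction schedule using get_week_schedule_alt.induct with
  | case1 => simp [get_week_schedule_alt, pvTriple]
  | case2 event h =>
      have hx : (PySem.Str.lower event == "rest") = true := by
        simpa [show PySem.Str.lower "rest" = "rest" by decide] using h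
      simp [get_week_schedule_alt, pvTriple, h, hx]
  | case3 event h =>
      have hx : (PySem.Str.lower event == "rest") = false := by
        simpa [show PySem.Str.lower "rest" = "rest" by decide] using eq_false_of_ne_true h
      simp [get_week_schedule_alt, pvTriple, h, hx]
  | case4 x y rest s mid n1 f1 e1 h1 n2 f2 e2 h2 iht ihd =>
      rw [get_week_schedule_alt]
      rw [show pvTriple (x :: y :: rest)
            = pvTriple ((x :: y :: rest).take ((x :: y :: rest).length / 2)
                ++ (x :: y :: rest).drop ((x :: y :: rest).length / 2)) by
          rw [List.take_append_drop]]
      rw [pvTriple_append]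
      simp only [s, mid] at iht ihd
      rw [iht, ihd]

-- ===== VERDICT (by name: the statement is the Claim_ definition above) =====
theorem get_week_schedule_spec : Claim_equal_get_week_schedule := by
  intro schedule _
  show _ = _
  rw [get_week_schedule_eq_triple, get_week_schedule_alt_eq_triple]
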